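-- pv_equiv track=rewrite | github.com/ministryofjustice/hmpps-github-discovery | github_dependency_discovery.py | _build_recommended_versions_index
-- ===== SOURCE A (Python) =====
-- def _build_recommended_versions_index(records):
--   index = {}
--   for record in records:
--     name = (record.get('name') or '').lower()
--     if not name:
--       continue
--     index.setdefault(name, []).append(record)
--   return index
-- ===== SOURCE B (Python) =====
-- def _build_recommended_versions_index(records):
--   names = [(record.get('name') or '').lower() for record in records]
--   keys = dict.fromkeys(n for n in names if n)
--   return {k: [r for r, n in zip(records, names) if n == k] for k in keys}
-- ===== Notes on version B (the rewrite author's own statement) =====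
-- stated objective: alternative
-- what changed: Replaces the single-pass setdefault-accumulation with a two-phase plan: precompute all lowercased names, take the ordered dedup of the non-empty ones (dict.fromkeys), then build each group by filtering the zipped (record, name) list per key.
import Mathlib
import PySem

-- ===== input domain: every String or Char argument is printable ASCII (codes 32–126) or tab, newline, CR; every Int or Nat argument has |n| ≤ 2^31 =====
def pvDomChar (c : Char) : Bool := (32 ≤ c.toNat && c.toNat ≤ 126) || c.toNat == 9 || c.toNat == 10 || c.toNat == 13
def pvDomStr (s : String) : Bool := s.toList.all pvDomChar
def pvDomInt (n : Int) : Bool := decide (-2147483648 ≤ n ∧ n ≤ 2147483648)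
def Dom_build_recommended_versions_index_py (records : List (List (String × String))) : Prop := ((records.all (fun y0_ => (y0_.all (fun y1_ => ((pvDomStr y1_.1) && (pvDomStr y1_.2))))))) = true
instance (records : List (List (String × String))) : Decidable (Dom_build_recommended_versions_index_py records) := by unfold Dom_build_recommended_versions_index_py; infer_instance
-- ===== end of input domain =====

-- B replaces A's single-pass setdefault accumulation by an ordered-dedup of the non-empty
-- lowercased names followed by a per-key filtering pass (alternative decomposition, same results).


-- ===== PORT A =====
-- (record.get('name') or '').lower() — shared by both Pythons verbatim
def pvKey (record : List (String × String)) : String :=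
  PySem.Str.lower (((PySem.Dict.mk record).get? "name").getD "")

def build_recommended_versions_index_py (records : List (List (String × String))) : List (String × List (List (String × String))) :=
  (records.foldl (fun index record =>
      let name := pvKey record
      if name = "" then index
      else index.modify name [] (fun l => l ++ [record]))
    PySem.Dict.empty).items

-- ===== PORT B =====
def build_recommended_versions_index_py_alt (records : List (List (String × String))) : List (String × List (List (String × String))) :=
  let names := records.map pvKey
  let keys := PySem.List.dedup (names.filter (fun n => n ≠ ""))
  keys.map (fun k => (k, ((records.zip names).filter (fun p => p.2 = k)).map (fun p => p.1)))

-- ===== PRECONDITION & SPEC =====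
def Spec_build_recommended_versions_index_py (records : List (List (String × String))) (out : List (String × List (List (String × String)))) : Prop := out = build_recommended_versions_index_py_alt records
instance (records : List (List (String × String))) (out : List (String × List (List (String × String)))) : Decidable (Spec_build_recommended_versions_index_py records out) := by unfold Spec_build_recommended_versions_index_py; infer_instance

-- ===== CLAIM (what is proved, stated in full; the proofs are below) =====
def Claim_equal_build_recommended_versions_index_py : Prop := ∀ (records : List (List (String × String))), Dom_build_recommended_versions_index_py records → Spec_build_recommended_versions_index_py records (build_recommended_versions_index_py records)

-- ===== LEMMAS AND PROOFS =====
-- A's skipping loop over records is the plain grouping fold over the (key, record) pairs with non-empty key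
theorem pvFoldA_eq (records : List (List (String × String)))
    (d : PySem.Dict String (List (List (String × String)))) :
    records.foldl (fun index record =>
      let name := pvKey record
      if name = "" then index
      else index.modify name [] (fun l => l ++ [record])) d
    = ((records.map (fun r => (pvKey r, r))).filter (fun p => p.1 ≠ "")).foldl
        (fun d p => d.modify p.1 [] (fun l => l ++ [p.2])) d := by
  induction records generalizing d with
  | nil => rfl
  | cons r rs ih => by_cases h : pvKey r = "" <;> simp [h, ih]

-- per key: A's appended group equals B's filter of the zipped list
theorem pvGroup_eq (records : List (List (String × String))) (k : String) (hk : k ≠ "") :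
    ((((records.map (fun r => (pvKey r, r))).filter (fun p => p.1 ≠ "")).filter
        (fun p => p.1 == k)).map (fun p => p.2))
    = (((records.zip (records.map pvKey)).filter (fun p => p.2 = k)).map (fun p => p.1)) := by
  rw [List.filter_filter]
  rw [List.filter_congr (q := fun p => p.1 == k)
    (by intro x _; by_cases h : x.1 = k <;> simp [h, hk])]
  have hz : records.zip (records.map pvKey) = records.map (fun r => (r, pvKey r)) := by
    have := List.zip_map' (f := fun r : List (String × String) => r) (g := pvKey) (l := records)
    simpa using this
  rw [hz]
  simp only [List.filter_map, List.map_map, Function.comp_def]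
  exact congrArg _ (List.filter_congr (by intro x _; by_cases h : pvKey x = k <;> simp [h]))

-- ===== VERDICT (by name: the statement is the Claim_ definition above) =====
theorem build_recommended_versions_index_py_spec : Claim_equal_build_recommended_versions_index_py := by
  intro records _
  unfold Spec_build_recommended_versions_index_py
  unfold build_recommended_versions_index_py build_recommended_versions_index_py_alt
  rw [pvFoldA_eq]
  have hnd := PySem.Dict.nodup_keys_foldl_modify_key
    ((records.map (fun r => (pvKey r, r))).filter (fun p => p.1 ≠ "")) (fun p => p.1) []
    (fun _ p => (fun l => l ++ [p.2])) PySem.Dict.empty PySem.Dict.nodup_keys_empty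
  rw [PySem.Dict.items_eq_map_keys _ hnd []]
  rw [PySem.Dict.keys_foldl_modify_key]
  have hkeys : PySem.Set.update (PySem.Dict.empty (κ := String) (ν := List (List (String × String)))).keys
      (((records.map (fun r => (pvKey r, r))).filter (fun p => p.1 ≠ "")).map (fun p => p.1))
      = PySem.List.dedup ((records.map pvKey).filter (fun n => n ≠ "")) := by
    rw [PySem.Dict.keys_empty, PySem.Set.update_nil_left, PySem.List.dedup_eq_ofList]
    congr 1
    simp [List.filter_map, List.map_map, Function.comp_def]
  rw [hkeys]
  apply List.map_congr_left
  intro k hkmem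
  have hk : k ≠ "" := by
    have := (PySem.List.mem_dedup _ k).mp hkmem
    have := List.of_mem_filter this
    simpa using this
  congr 1
  rw [PySem.Dict.getD_foldl_modify_append, PySem.Dict.getD_empty]
  simpa using pvGroup_eq records k hk
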